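-- pv_equiv track=rewrite | github.com/Ssallier/Natural-language-processing | ramili_sallier_projetBEPEIP.py | nombre_liste_mots
-- ===== SOURCE A (Python) =====
-- def nombre_liste_mots(l):
--     """
--
-- renvoie la liste de tout les mots différents ainsi que le nombre de mots d'une liste de tweets déjà traitées
--     Parameters
--     ----------
--     l : list
--         une liste de tweets deja traitée
--
--     Returns
--     -------
--     type : tuple
--         un tuple contenant le nombre de mots d'un tweet ainsi que la liste de tous les mots différents
--
--     """
--     nb = 0
--     liste = []
--     # on parcourt chaque tweets de la liste
--     for tweets in l :
--         # on parcourt chaque mots du tweet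
--         for mots in tweets.split() :
--             # on incrémente le compteur de mots
--             nb += 1
--             # si le mot n'est pas dans la liste des mots différents
--             if mots not in liste:
--                 #on ajoute le mot dans cette liste
--                 liste.append(mots)
--     return (nb,liste)
-- ===== SOURCE B (Python) =====
-- def nombre_liste_mots(l):
--     # Flatten once; build word -> first index by overwriting in a reverse scan
--     # (no membership test); recover first-occurrence order by sorting on index.
--     words = [w for tweet in l for w in tweet.split()]
--     first = {}
--     for i, w in reversed(list(enumerate(words))):
--         first[w] = i
--     return (len(words), sorted(first, key=first.get))
-- ===== Notes on version B (the rewrite author's own statement) =====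
-- stated objective: faster
-- what changed: Replaces the fused count-and-membership-scan loop by: flatten once, build a word-to-first-index dict by overwriting during a reverse scan (no membership test anywhere), then recover the first-occurrence order by sorting the distinct words on that index.
import Mathlib
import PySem

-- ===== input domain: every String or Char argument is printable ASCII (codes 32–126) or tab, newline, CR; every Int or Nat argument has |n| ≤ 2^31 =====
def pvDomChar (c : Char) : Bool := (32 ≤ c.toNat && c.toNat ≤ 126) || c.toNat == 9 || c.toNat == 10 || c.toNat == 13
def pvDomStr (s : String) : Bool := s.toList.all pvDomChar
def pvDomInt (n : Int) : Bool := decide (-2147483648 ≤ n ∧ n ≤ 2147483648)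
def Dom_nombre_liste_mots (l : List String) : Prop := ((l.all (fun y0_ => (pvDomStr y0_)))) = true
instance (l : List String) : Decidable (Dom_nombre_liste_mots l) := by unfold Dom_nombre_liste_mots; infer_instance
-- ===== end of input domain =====

-- ===== PORT A =====
def nombre_liste_mots (l : List String) : Int × List String :=
  let st := l.foldl (fun st tweets =>
    (PySem.Str.split₀ tweets).foldl (fun st mots =>
      (st.1 + 1, if st.2.contains mots then st.2 else st.2 ++ [mots])) st)
    ((0 : Int), ([] : List String))
  (st.1, st.2)

-- ===== PORT B =====
-- B: flatten once; build word -> first index by overwriting in a reverse scan (no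
-- membership test); recover first-occurrence order by sorting the keys on that index.
-- (sorted(first, key=first.get): every key is present in 'first', so getD's default is never used)
def nombre_liste_mots_alt (l : List String) : Int × List String :=
  let words := l.flatMap (fun tweet => PySem.Str.split₀ tweet)
  let first := ((PySem.List.enumerate words).reverse).foldl
      (fun (d : PySem.Dict String Int) p => d.insert p.2 p.1) PySem.Dict.empty
  ((words.length : Int), PySem.List.sorted first.keys (fun w => first.getD w 0) false)

-- ===== PRECONDITION & SPEC =====
def Spec_nombre_liste_mots (l : List String) (out : Int × List String) : Prop := out = nombre_liste_mots_alt l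
instance (l : List String) (out : Int × List String) : Decidable (Spec_nombre_liste_mots l out) := by unfold Spec_nombre_liste_mots; infer_instance

-- ===== CLAIM =====
def Claim_equal_nombre_liste_mots : Prop := ∀ (l : List String), Dom_nombre_liste_mots l → Spec_nombre_liste_mots l (nombre_liste_mots l)

-- ===== LEMMAS AND PROOFS =====

-- A's inner word loop increments the counter by the word count and set-adds each word.
lemma inner_step (ws : List String) (nb : Int) (acc : List String) :
    ws.foldl (fun st mots => (st.1 + 1, if st.2.contains mots then st.2 else st.2 ++ [mots]))
      ((nb, acc) : Int × List String)
      = (nb + ws.length, PySem.Set.update acc ws) := by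
  induction ws generalizing nb acc with
  | nil => simp [PySem.Set.update]
  | cons w ws ih =>
    simp only [List.foldl_cons, ih, Prod.mk.injEq, PySem.Set.update_cons]
    refine ⟨by simp [List.length_cons]; ring, by simp [PySem.Set.add]⟩

-- A's outer loop: total word count, and the set-update by the flattened word list.
lemma outer_loop (l : List String) (nb : Int) (acc : List String) :
    l.foldl (fun st tweets =>
      (PySem.Str.split₀ tweets).foldl (fun st mots =>
        (st.1 + 1, if st.2.contains mots then st.2 else st.2 ++ [mots])) st)
      ((nb, acc) : Int × List String)
      = (nb + (l.flatMap (fun t => PySem.Str.split₀ t)).length,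
         PySem.Set.update acc (l.flatMap (fun t => PySem.Str.split₀ t))) := by
  induction l generalizing nb acc with
  | nil => simp [PySem.Set.update]
  | cons t l ih =>
    simp only [List.foldl_cons, inner_step, ih, List.flatMap_cons, List.length_append,
      PySem.Set.update_append, Prod.mk.injEq]
    refine ⟨by push_cast; ring, trivial⟩

-- Folding inserts over a reversed pair list: the FIRST pair with the key wins.
lemma revfold_get? (E : List (Int × String)) (d0 : PySem.Dict String Int) (w : String) :
    (E.reverse.foldl (fun (d : PySem.Dict String Int) p => d.insert p.2 p.1) d0).get? w
      = (match E.find? (fun p => p.2 == w) with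
         | some p => some p.1
         | none => d0.get? w) := by
  induction E generalizing d0 with
  | nil => simp
  | cons p E ih =>
    rw [List.reverse_cons, List.foldl_append]
    simp only [List.foldl_cons, List.foldl_nil, List.find?_cons]
    by_cases h : p.2 = w
    · have hb : (p.2 == w) = true := by simp [h]
      rw [hb, ← h, PySem.Dict.get?_insert_self]
    · have hb : (p.2 == w) = false := by simp [h]
      rw [PySem.Dict.get?_insert_of_ne _ _ (fun he => h he.symm), ih d0, hb]

-- find? on an enumeration yields the FIRST index of the word.
lemma find?_enumerate (xs : List String) (s : Int) (w : String) (hw : w ∈ xs) :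
    (PySem.List.enumerate xs s).find? (fun p => p.2 == w)
      = some (s + (xs.idxOf w : Int), w) := by
  induction xs generalizing s with
  | nil => cases hw
  | cons x xs ih =>
    rw [PySem.List.enumerate_cons, List.find?_cons]
    by_cases h : x = w
    · simp [h, List.idxOf_cons_self]
    · have hb : (x == w) = false := by simp [h]
      have hw' : w ∈ xs := by cases hw with
        | head => exact absurd rfl h
        | tail _ h' => exact h'
      simp only [hb, ih (s + 1) hw', List.idxOf_cons_ne _ h]
      congr 2
      push_cast
      ring

-- The first-occurrence dedup is strictly increasing in first index.
lemma ofList_pairwise_idxOf (xs : List String) :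
    (PySem.Set.ofList xs).Pairwise (fun a b => xs.idxOf a < xs.idxOf b) := by
  induction xs with
  | nil => simp
  | cons x xs ih =>
    rw [PySem.Set.ofList_cons]
    constructor
    · intro b hb
      have hbx : b ∈ PySem.Set.ofList xs ∧ b ≠ x := by
        simpa using (PySem.Set.mem_discard (PySem.Set.ofList xs) x b).mp hb
      rw [List.idxOf_cons_self, List.idxOf_cons_ne _ (fun he => hbx.2 he.symm)]
      omega
    · have hsub : (PySem.Set.discard (PySem.Set.ofList xs) x).Sublist (PySem.Set.ofList xs) := by
        simp [PySem.Set.discard]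
      refine List.Pairwise.imp_of_mem ?_ (ih.sublist hsub)
      intro a b ha hb hlt
      have hax : a ≠ x := ((PySem.Set.mem_discard _ _ _).mp ha).2
      have hbx : b ≠ x := ((PySem.Set.mem_discard _ _ _).mp hb).2
      rw [List.idxOf_cons_ne _ (fun he => hax he.symm), List.idxOf_cons_ne _ (fun he => hbx he.symm)]
      omega

-- getD of the reverse-built first-index dict is the first index, for words present.
lemma getD_first (words : List String) (w : String) (hw : w ∈ words) :
    ((PySem.List.enumerate words).reverse.foldl
        (fun (d : PySem.Dict String Int) p => d.insert p.2 p.1) PySem.Dict.empty).getD w 0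
      = (words.idxOf w : Int) := by
  have hg := revfold_get? (PySem.List.enumerate words 0) PySem.Dict.empty w
  rw [find?_enumerate words 0 w hw] at hg
  simp only [zero_add] at hg
  simp only [PySem.Dict.getD, hg, Option.getD_some]

-- keys of the reverse-built dict = the distinct words (last-occurrence order).
lemma keys_first (words : List String) :
    ((PySem.List.enumerate words).reverse.foldl
        (fun (d : PySem.Dict String Int) p => d.insert p.2 p.1) PySem.Dict.empty).keys
      = PySem.Set.ofList words.reverse := by
  have h := PySem.Dict.keys_foldl_insert_key ((PySem.List.enumerate words).reverse)
    (fun p => p.2) (fun _ p => p.1) (PySem.Dict.empty : PySem.Dict String Int)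
  simp only [List.map_reverse, PySem.List.map_snd_enumerate] at h
  rw [h]
  simp [PySem.Dict.empty, PySem.Set.update_nil_left]

-- ===== VERDICT =====
theorem nombre_liste_mots_spec : Claim_equal_nombre_liste_mots := by
  intro l _
  unfold Spec_nombre_liste_mots
  simp only [nombre_liste_mots, nombre_liste_mots_alt, outer_loop, zero_add,
    PySem.Set.update_nil_left]
  refine Prod.ext rfl ?_
  have hperm : (PySem.Set.ofList (l.flatMap (fun tweet => PySem.Str.split₀ tweet))).Perm
      ((PySem.List.enumerate (l.flatMap (fun tweet => PySem.Str.split₀ tweet))).reverse.foldl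
        (fun (d : PySem.Dict String Int) p => d.insert p.2 p.1) PySem.Dict.empty).keys := by
    rw [keys_first]
    refine (List.perm_ext_iff_of_nodup (PySem.Set.nodup_ofList _) (PySem.Set.nodup_ofList _)).mpr ?_
    intro a
    simp [PySem.Set.mem_ofList]
  have hpw : (PySem.Set.ofList (l.flatMap (fun tweet => PySem.Str.split₀ tweet))).Pairwise
      (fun a b =>
        ((PySem.List.enumerate (l.flatMap (fun tweet => PySem.Str.split₀ tweet))).reverse.foldl
          (fun (d : PySem.Dict String Int) p => d.insert p.2 p.1) PySem.Dict.empty).getD a 0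
        < ((PySem.List.enumerate (l.flatMap (fun tweet => PySem.Str.split₀ tweet))).reverse.foldl
          (fun (d : PySem.Dict String Int) p => d.insert p.2 p.1) PySem.Dict.empty).getD b 0) := by
    refine List.Pairwise.imp_of_mem ?_ (ofList_pairwise_idxOf _)
    intro a b ha hb hlt
    rw [getD_first _ _ ((PySem.Set.mem_ofList _ _).mp ha),
        getD_first _ _ ((PySem.Set.mem_ofList _ _).mp hb)]
    exact_mod_cast hlt
  exact (PySem.List.sorted_eq_of_perm_of_pairwise_lt _ _ _ hperm hpw).symm
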